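-- pv_equiv track=rewrite | github.com/verdetea22/CS115-Music-Rec | musicrecplus.py | numMatches
-- ===== SOURCE A (Python) =====
-- def numMatches(list1, list2):
--     """ [HELPER FUNCTION] return the number of elements that match between two sorted lists
--          author: Kent Q (from textbook)
--     """
--     matches, i, j = 0, 0, 0
--     while i < len(list1) and j < len(list2):
--         if list1[i] == list2[j]:
--             matches += 1
--             i += 1
--             j += 1
--         elif list1[i] < list2[j]:
--             i += 1
--         else:
--             j += 1
--     return matches
-- ===== SOURCE B (Python) =====
-- def numMatches(list1, list2):
--     """Count matching elements between two sorted lists by consuming explicit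
--     stacks (reversed copies, O(1) pops) instead of walking index pointers."""
--     s1, s2 = list1[::-1], list2[::-1]
--     matches = 0
--     while s1 and s2:
--         if s1[-1] == s2[-1]:
--             matches += 1
--             s1.pop()
--             s2.pop()
--         elif s1[-1] < s2[-1]:
--             s1.pop()
--         else:
--             s2.pop()
--     return matches
-- ===== Notes on version B (the rewrite author's own statement) =====
-- stated objective: alternative
-- what changed: Replaces the index-pointer while loop over fixed lists with a loop that destructively consumes two explicit stacks (reversed copies, popping the tops), so no index arithmetic or len() bounds are maintained.
import Mathlib
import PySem

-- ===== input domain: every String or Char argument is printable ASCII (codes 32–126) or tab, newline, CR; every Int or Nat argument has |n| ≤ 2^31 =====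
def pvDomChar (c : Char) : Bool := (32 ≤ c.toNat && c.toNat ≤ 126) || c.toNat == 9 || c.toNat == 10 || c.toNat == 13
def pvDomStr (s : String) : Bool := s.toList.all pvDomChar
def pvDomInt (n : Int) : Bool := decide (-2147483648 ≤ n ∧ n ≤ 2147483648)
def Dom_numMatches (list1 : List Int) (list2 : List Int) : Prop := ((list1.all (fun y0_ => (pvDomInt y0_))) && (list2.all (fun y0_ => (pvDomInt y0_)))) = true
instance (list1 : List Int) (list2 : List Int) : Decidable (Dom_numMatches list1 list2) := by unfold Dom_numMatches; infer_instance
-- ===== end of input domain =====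

-- B consumes explicit stacks instead of maintaining index pointers; same O(n+m) cost ("alternative").
-- Both loops are ported with a fuel parameter (len1+len2, enough for every iteration) purely as a
-- structural-recursion totality guard; it changes no computed value.

-- ===== PORT A =====
-- A's while loop over indices i, j; the loop guard bounds list1[i] / list2[j], so getD's default is never used.
def numMatchesLoop (fuel : Nat) (list1 list2 : List Int) (acc : Int) (i j : Nat) : Int :=
  match fuel with
  | 0 => acc
  | fuel + 1 =>
    if i < list1.length ∧ j < list2.length then
      let a := list1.getD i 0
      let b := list2.getD j 0
      if a = b then
        numMatchesLoop fuel list1 list2 (acc + 1) (i + 1) (j + 1)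
      else if a < b then
        numMatchesLoop fuel list1 list2 acc (i + 1) j
      else
        numMatchesLoop fuel list1 list2 acc i (j + 1)
    else acc

def numMatches (list1 : List Int) (list2 : List Int) : Int :=
  numMatchesLoop (list1.length + list2.length) list1 list2 0 0 0

-- ===== PORT B =====
-- B's stacks s1 = list1[::-1], s2 = list2[::-1] with the top at the Python list's END are
-- represented top-first, i.e. as the Lean list in original order: s[-1] is the head and
-- s.pop() takes the tail; the `while s1 and s2` guard is the catch-all nil case.
def numMatchesAltGo : Nat → List Int → List Int → Int
  | _, [], _ => 0
  | _, _, [] => 0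
  | 0, _ :: _, _ :: _ => 0
  | fuel + 1, a :: s1, b :: s2 =>
    if a = b then 1 + numMatchesAltGo fuel s1 s2
    else if a < b then numMatchesAltGo fuel s1 (b :: s2)
    else numMatchesAltGo fuel (a :: s1) s2

def numMatches_alt (list1 : List Int) (list2 : List Int) : Int :=
  numMatchesAltGo (list1.length + list2.length) list1 list2

-- ===== PRECONDITION & SPEC =====
def Spec_numMatches (list1 : List Int) (list2 : List Int) (out : Int) : Prop := out = numMatches_alt list1 list2
instance (list1 : List Int) (list2 : List Int) (out : Int) : Decidable (Spec_numMatches list1 list2 out) := by unfold Spec_numMatches; infer_instance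

-- ===== CLAIM (what is proved, stated in full; the proofs are below) =====
def Claim_equal_numMatches : Prop := ∀ (list1 : List Int) (list2 : List Int), Dom_numMatches list1 list2 → Spec_numMatches list1 list2 (numMatches list1 list2)

-- ===== LEMMAS AND PROOFS =====

-- B's loop returns 0 as soon as either stack is empty (the catch-all branch).
theorem numMatchesAltGo_nil_left (fuel : Nat) (s2 : List Int) : numMatchesAltGo fuel [] s2 = 0 := by
  cases s2 <;> simp [numMatchesAltGo]

theorem numMatchesAltGo_nil_right (fuel : Nat) (s1 : List Int) : numMatchesAltGo fuel s1 [] = 0 := by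
  cases s1 <;> simp [numMatchesAltGo]

-- Loop invariant: with enough fuel, A's loop at state (acc, i, j) returns acc plus B's count
-- on the dropped suffixes, with the SAME fuel (both consume one unit per iteration).
theorem numMatchesLoop_eq (fuel : Nat) (list1 list2 : List Int) (acc : Int) (i j : Nat)
    (hfuel : (list1.length - i) + (list2.length - j) ≤ fuel) :
    numMatchesLoop fuel list1 list2 acc i j
      = acc + numMatchesAltGo fuel (list1.drop i) (list2.drop j) := by
  induction fuel generalizing acc i j with
  | zero =>
    have h1 : list1.drop i = [] := List.drop_eq_nil_of_le (by omega)
    rw [numMatchesLoop, h1, numMatchesAltGo_nil_left]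
    ring
  | succ fuel ih =>
    rw [numMatchesLoop]
    by_cases h : i < list1.length ∧ j < list2.length
    · rw [if_pos h]
      have e1 := List.drop_eq_getElem_cons h.1
      have e2 := List.drop_eq_getElem_cons h.2
      have ga : list1.getD i 0 = list1[i] := List.getD_eq_getElem list1 0 h.1
      have gb : list2.getD j 0 = list2[j] := List.getD_eq_getElem list2 0 h.2
      rw [e1, e2, numMatchesAltGo]
      simp only [ga, gb]
      by_cases heq : list1[i] = list2[j]
      · rw [if_pos heq, if_pos heq, ih (acc + 1) (i + 1) (j + 1) (by omega)]
        ring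
      · rw [if_neg heq, if_neg heq]
        by_cases hlt : list1[i] < list2[j]
        · rw [if_pos hlt, if_pos hlt, ih acc (i + 1) j (by omega), e2]
        · rw [if_neg hlt, if_neg hlt, ih acc i (j + 1) (by omega), e1]
    · rw [if_neg h]
      have : list1.drop i = [] ∨ list2.drop j = [] := by
        rcases not_and_or.mp h with h1 | h1
        · exact Or.inl (List.drop_eq_nil_of_le (by omega))
        · exact Or.inr (List.drop_eq_nil_of_le (by omega))
      rcases this with h1 | h1 <;> rw [h1]
      · rw [numMatchesAltGo_nil_left]; ring
      · rw [numMatchesAltGo_nil_right]; ring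

-- ===== VERDICT (by name: the statement is the Claim_ definition above) =====
theorem numMatches_spec : Claim_equal_numMatches := by
  intro list1 list2 _
  unfold Spec_numMatches numMatches numMatches_alt
  simpa using numMatchesLoop_eq (list1.length + list2.length) list1 list2 0 0 0 (by omega)
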